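-- pv_equiv track=rewrite | github.com/FengyiLi1102/Python-Learning | puzzler.py | puzzler
-- ===== SOURCE A (Python) =====
-- def puzzler(word):
--
--     i = 0
--     num = ''
--     while i < len(word) - 1:
--         if ord(word[i]) - ord(word[i + 1]) == 0:
--             num = num + '0'
--         else:
--             num = num + '1'
--         i = i + 1
--
--     if num.find('01010') != -1:
--         return True
--     else:
--         return False
-- ===== SOURCE B (Python) =====
-- def puzzler(word):
--     for i in range(len(word) - 5):
--         if (word[i] == word[i + 1] and word[i + 1] != word[i + 2]
--                 and word[i + 2] == word[i + 3] and word[i + 3] != word[i + 4]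
--                 and word[i + 4] == word[i + 5]):
--             return True
--     return False
-- ===== Notes on version B (the rewrite author's own statement) =====
-- stated objective: faster
-- what changed: B drops the intermediate adjacency bit string and the substring search entirely and scans six-character windows of the word directly, returning on the first window matching the =,!=,=,!=,= pattern.
import Mathlib
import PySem

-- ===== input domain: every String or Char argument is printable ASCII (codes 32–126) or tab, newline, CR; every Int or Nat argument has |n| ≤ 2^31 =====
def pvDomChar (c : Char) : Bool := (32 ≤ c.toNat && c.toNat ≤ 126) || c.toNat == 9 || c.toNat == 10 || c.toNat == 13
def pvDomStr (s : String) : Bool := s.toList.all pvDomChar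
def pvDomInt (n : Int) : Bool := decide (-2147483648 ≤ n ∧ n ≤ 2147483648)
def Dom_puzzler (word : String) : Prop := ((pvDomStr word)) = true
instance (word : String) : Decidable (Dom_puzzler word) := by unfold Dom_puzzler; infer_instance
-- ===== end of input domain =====

-- B replaces A's adjacency bit string + substring search by a direct scan of
-- six-character windows (same result, no intermediate string).

-- ===== PORT A =====
-- A's while loop: i starts at 0 and only increments, so a Nat `i` with `getD`
-- matches Python's `word[i]` (the loop guard keeps i and i+1 in range);
-- `ord(word[i]) - ord(word[i+1]) == 0` is exactly character equality.
def puzzlerLoop (w : List Char) (i : Nat) (num : List Char) : List Char :=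
  if i < w.length - 1 then
    puzzlerLoop w (i + 1)
      (num ++ [if w.getD i ' ' = w.getD (i + 1) ' ' then '0' else '1'])
  else num
termination_by w.length - 1 - i

def puzzler (word : String) : Bool :=
  let num := puzzlerLoop word.toList 0 []
  if PySem.Chars.find num ['0', '1', '0', '1', '0'] ≠ -1 then true else false

-- ===== PORT B =====
-- every i drawn from range(len(word) - 5) keeps i+5 in range, so `getD` matches
-- Python's direct indexing; Nat subtraction gives Python's empty range for short words.
def windowCheck (w : List Char) (i : Nat) : Bool :=
  (w.getD i ' ' == w.getD (i + 1) ' ') && !(w.getD (i + 1) ' ' == w.getD (i + 2) ' ')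
    && (w.getD (i + 2) ' ' == w.getD (i + 3) ' ') && !(w.getD (i + 3) ' ' == w.getD (i + 4) ' ')
    && (w.getD (i + 4) ' ' == w.getD (i + 5) ' ')

def puzzlerAltLoop (w : List Char) : List Nat → Bool
  | [] => false
  | i :: rest => if windowCheck w i then true else puzzlerAltLoop w rest

def puzzler_alt (word : String) : Bool :=
  puzzlerAltLoop word.toList (List.range (word.toList.length - 5))

-- ===== PRECONDITION & SPEC =====
def Spec_puzzler (word : String) (out : Bool) : Prop := out = puzzler_alt word
instance (word : String) (out : Bool) : Decidable (Spec_puzzler word out) := by unfold Spec_puzzler; infer_instance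

-- ===== CLAIM (what is proved, stated in full; the proofs are below) =====
def Claim_equal_puzzler : Prop := ∀ (word : String), Dom_puzzler word → Spec_puzzler word (puzzler word)

-- ===== LEMMAS AND PROOFS =====

-- structural version of A's adjacency bit string
def bits : List Char → List Char
  | a :: b :: t => (if a = b then '0' else '1') :: bits (b :: t)
  | _ => []

theorem puzzlerLoop_eq (w : List Char) (i : Nat) (num : List Char) :
    puzzlerLoop w i num = num ++ bits (w.drop i) := by
  fun_induction puzzlerLoop with
  | case1 i num h ih =>
    have h1 : i < w.length := by omega
    have h2 : i + 1 < w.length := by omega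
    have hd : w.drop i = w[i] :: w[i+1] :: w.drop (i+2) := by
      rw [List.drop_eq_getElem_cons h1, List.drop_eq_getElem_cons h2]
    simp only [dite_eq_ite] at ih
    rw [ih, hd, bits]
    have : w.drop (i+1) = w[i+1] :: w.drop (i+2) := List.drop_eq_getElem_cons h2
    rw [this]
    simp [List.getD_eq_getElem?_getD, h1, h2]
  | case2 i num h =>
    have hl : (w.drop i).length ≤ 1 := by rw [List.length_drop]; omega
    rcases h' : w.drop i with _ | ⟨a, _ | ⟨b, t⟩⟩
    · simp [bits]
    · simp [bits]
    · rw [h'] at hl; simp at hl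

theorem bits_drop (w : List Char) (j : Nat) :
    (bits w).drop j = bits (w.drop j) := by
  induction w generalizing j with
  | nil => simp [bits]
  | cons a t ih =>
    rcases t with _ | ⟨b, t'⟩
    · rcases j with _ | j <;> simp [bits]
    · rcases j with _ | j
      · simp
      · simpa [bits] using ih j

theorem windowCheck_drop (w : List Char) (i : Nat) :
    windowCheck (w.drop i) 0 = windowCheck w i := by
  simp [windowCheck, List.getD_eq_getElem?_getD, List.getElem?_drop]

theorem prefix_bits_iff (v : List Char) :
    ['0', '1', '0', '1', '0'] <+: bits v ↔ 6 ≤ v.length ∧ windowCheck v 0 = true := by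
  rcases v with _ | ⟨a, _ | ⟨b, _ | ⟨c, _ | ⟨d, _ | ⟨e, _ | ⟨f, t⟩⟩⟩⟩⟩⟩
  · simp [bits]
  · simp [bits]
  · simp [bits, List.cons_prefix_cons]
  · simp [bits, List.cons_prefix_cons]
  · simp [bits, List.cons_prefix_cons]
  · simp [bits, List.cons_prefix_cons]
  · simp only [bits, List.cons_prefix_cons, List.nil_prefix, and_true, windowCheck,
      List.length_cons, List.getD_cons_zero, List.getD_cons_succ]
    constructor
    · rintro ⟨h1, h2, h3, h4, h5⟩
      refine ⟨by omega, ?_⟩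
      split_ifs at h1 h2 h3 h4 h5 <;> simp_all
    · rintro ⟨-, h⟩
      split_ifs <;> simp_all

theorem altLoop_any (w : List Char) (js : List Nat) :
    puzzlerAltLoop w js = js.any (windowCheck w) := by
  induction js with
  | nil => rfl
  | cons j rest ih =>
    rw [puzzlerAltLoop, List.any_cons, ih]
    split <;> simp_all

theorem puzzler_iff (word : String) :
    puzzler word = true ↔ puzzler_alt word = true := by
  unfold puzzler puzzler_alt
  rw [puzzlerLoop_eq, altLoop_any]
  simp only [List.drop_zero, List.nil_append, List.any_eq_true, List.mem_range]
  have key : PySem.Chars.find (bits word.toList) ['0', '1', '0', '1', '0'] ≠ -1 ↔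
      ∃ i, i < word.toList.length - 5 ∧ windowCheck word.toList i = true := by
    rw [PySem.Chars.find_ne_neg_one_iff, ← PySem.Chars.isIn_iff_infix,
      ← PySem.Chars.exists_prefix_drop_iff_isIn]
    constructor
    · rintro ⟨j, hj⟩
      rw [bits_drop, prefix_bits_iff] at hj
      obtain ⟨hlen, hc⟩ := hj
      rw [windowCheck_drop] at hc
      have : j < word.toList.length - 5 := by
        rw [List.length_drop] at hlen; omega
      exact ⟨j, this, hc⟩
    · rintro ⟨i, hi, hc⟩
      refine ⟨i, ?_⟩
      rw [bits_drop, prefix_bits_iff, windowCheck_drop]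
      exact ⟨by rw [List.length_drop]; omega, hc⟩
  split_ifs with hf
  · simpa using key.mp hf
  · simpa using fun i hi hc => hf (key.mpr ⟨i, hi, hc⟩)

-- ===== VERDICT (by name: the statement is the Claim_ definition above) =====
theorem puzzler_spec : Claim_equal_puzzler := by
  intro word _
  unfold Spec_puzzler
  have := puzzler_iff word
  rcases hA : puzzler word <;> rcases hB : puzzler_alt word <;> simp_all
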